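-- pv_equiv track=rewrite | github.com/fbuetler/e-learning-environment | scripts/trees.py | get_visible_trees
-- ===== SOURCE A (Python) =====
-- def get_visible_trees(line):
--     min = 0
--     visibile = 0
--     for tree in line:
--         if tree > min:
--             visibile += 1
--             min = tree
--     return visibile
-- ===== SOURCE B (Python) =====
-- from itertools import accumulate
--
--
-- def get_visible_trees(line):
--     maxes = list(accumulate(line, max, initial=0))
--     return sum(1 for a, b in zip(maxes, maxes[1:]) if b > a)
-- ===== Notes on version B (the rewrite author's own statement) =====
-- stated objective: idiomatic
-- what changed: Replaces the stateful running-min/counter loop by a prefix running-max sequence built with itertools.accumulate, then counts strict increases between consecutive elements of that sequence.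
import Mathlib
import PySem

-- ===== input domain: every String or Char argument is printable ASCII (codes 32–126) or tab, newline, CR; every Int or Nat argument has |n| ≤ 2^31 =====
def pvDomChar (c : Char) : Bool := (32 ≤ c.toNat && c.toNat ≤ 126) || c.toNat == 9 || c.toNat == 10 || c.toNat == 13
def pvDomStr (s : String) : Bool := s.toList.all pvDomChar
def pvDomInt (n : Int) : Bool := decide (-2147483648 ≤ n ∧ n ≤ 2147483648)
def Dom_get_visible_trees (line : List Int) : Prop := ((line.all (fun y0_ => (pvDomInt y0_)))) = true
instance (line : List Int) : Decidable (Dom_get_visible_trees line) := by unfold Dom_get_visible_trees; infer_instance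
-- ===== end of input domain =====

-- B replaces A's stateful running-min/counter loop by building the running-max prefix
-- sequence and counting strict increases between consecutive elements (objective: idiomatic).

-- ===== PORT A =====
def get_visible_trees (line : List Int) : Int :=
  (line.foldl (fun (s : Int × Int) tree =>
    if tree > s.1 then (tree, s.2 + 1) else s) (0, 0)).2

-- ===== PORT B =====
def get_visible_trees_alt (line : List Int) : Int :=
  let maxes := line.scanl (fun a b => max a b) 0
  (maxes.zip maxes.tail).foldl (fun acc p => if p.2 > p.1 then acc + 1 else acc) 0

-- ===== PRECONDITION & SPEC =====
def Spec_get_visible_trees (line : List Int) (out : Int) : Prop := out = get_visible_trees_alt line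
instance (line : List Int) (out : Int) : Decidable (Spec_get_visible_trees line out) := by unfold Spec_get_visible_trees; infer_instance

-- ===== CLAIM (what is proved, stated in full; the proofs are below) =====
def Claim_equal_get_visible_trees : Prop := ∀ (line : List Int), Dom_get_visible_trees line → Spec_get_visible_trees line (get_visible_trees line)

-- ===== LEMMAS AND PROOFS =====

theorem gvt_key (line : List Int) : ∀ (m v : Int),
    (line.foldl (fun (s : Int × Int) tree =>
      if tree > s.1 then (tree, s.2 + 1) else s) (m, v)).2 =
    (let maxes := line.scanl (fun a b => max a b) m
     (maxes.zip maxes.tail).foldl (fun acc p => if p.2 > p.1 then acc + 1 else acc) v) := by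
  induction line with
  | nil => intro m v; simp
  | cons t rest ih =>
    intro m v
    simp only [List.foldl_cons, List.scanl_cons]
    by_cases h : t > m
    · have hm : max m t = t := by omega
      cases rest with
      | nil => simp [hm, h]
      | cons r rs =>
        simp only [List.scanl_cons] at *
        simpa [hm, h] using ih t (v + 1)
    · have hm : max m t = m := by omega
      cases rest with
      | nil => simp [hm, h]
      | cons r rs =>
        simp only [List.scanl_cons] at *
        simpa [hm, h] using ih m v

-- ===== VERDICT (by name: the statement is the Claim_ definition above) =====
theorem get_visible_trees_spec : Claim_equal_get_visible_trees := by
  intro line _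
  unfold Spec_get_visible_trees get_visible_trees get_visible_trees_alt
  exact gvt_key line 0 0
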